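-- pv_equiv track=rewrite | github.com/mayur75584/GeeksForGeeks | GeeksforGeeks/116(Convert a sequence into its equivalent mobile numeric keypad sequnce).py | printSequence
-- ===== SOURCE A (Python) =====
-- def printSequence(S):
--     _2='ABC'
--     _3='DEF'
--     _4='GHI'
--     _5='JKL'
--     _6='MNO'
--     _7='PQRS'
--     _8='TUV'
--     _9='WXYZ'
--     s1=''
--     for i in S:
--         if i in _2:
--             x=_2.index(i)+1
--             s1+='2'*x
--         elif i in _3:
--             x=_3.index(i)+1
--             s1+='3'*x
--         elif i in _4:
--             x=_4.index(i)+1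
--             s1+='4'*x
--         elif i in _5:
--             x=_5.index(i)+1
--             s1+='5'*x
--         elif i in _6:
--             x=_6.index(i)+1
--             s1+='6'*x
--         elif i in _7:
--             x=_7.index(i)+1
--             s1+='7'*x
--         elif i in _8:
--             x=_8.index(i)+1
--             s1+='8'*x
--         elif i in _9:
--             x=_9.index(i)+1
--             s1+='9'*x
--         elif i==' ':
--             s1+='0'
--     return s1
-- ===== SOURCE B (Python) =====
-- def printSequence(S):
--     # Compute each key press count arithmetically from the character code:
--     # no letter-group tables, no membership scans.
--     out = []
--     for c in S:
--         o = ord(c) - 65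
--         if 0 <= o < 26:
--             if o < 15:            # A..O: three letters per key
--                 d, r = divmod(o, 3)
--                 out.append(chr(50 + d) * (r + 1))
--             elif o < 19:          # PQRS
--                 out.append('7' * (o - 14))
--             elif o < 22:          # TUV
--                 out.append('8' * (o - 18))
--             else:                 # WXYZ
--                 out.append('9' * (o - 21))
--         elif c == ' ':
--             out.append('0')
--     return ''.join(out)
-- ===== Notes on version B (the rewrite author's own statement) =====
-- stated objective: faster
-- what changed: Replaced A's table-driven 8-way membership/.index() chain over letter-group strings by pure arithmetic on the character code: the key digit and repeat count are computed from ord(c)-65 with divmod and offsets (no letter tables or scans), collected and joined once instead of repeated string concatenation.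
import Mathlib
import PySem

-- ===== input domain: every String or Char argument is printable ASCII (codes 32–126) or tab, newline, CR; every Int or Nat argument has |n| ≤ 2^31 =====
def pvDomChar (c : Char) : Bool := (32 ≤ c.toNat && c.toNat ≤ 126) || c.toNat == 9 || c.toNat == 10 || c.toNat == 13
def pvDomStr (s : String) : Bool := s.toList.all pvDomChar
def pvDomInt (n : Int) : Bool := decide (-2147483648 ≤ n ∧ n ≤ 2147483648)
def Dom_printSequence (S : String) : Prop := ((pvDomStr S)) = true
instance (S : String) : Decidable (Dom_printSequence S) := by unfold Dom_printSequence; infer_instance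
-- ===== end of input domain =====

-- B replaces A's table-driven 8-way membership/.index() chain over letter-group strings
-- by pure arithmetic on the character code (divmod and offsets), joined once; the timing
-- run measured B faster by a constant factor.


-- ===== PORT A =====
-- A's group strings _2 … _9 (as their character lists)
def pv2 : List Char := ['A', 'B', 'C']
def pv3 : List Char := ['D', 'E', 'F']
def pv4 : List Char := ['G', 'H', 'I']
def pv5 : List Char := ['J', 'K', 'L']
def pv6 : List Char := ['M', 'N', 'O']
def pv7 : List Char := ['P', 'Q', 'R', 'S']
def pv8 : List Char := ['T', 'U', 'V']
def pv9 : List Char := ['W', 'X', 'Y', 'Z']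

-- one if/elif arm of A: 'x = grp.index(i)+1; s1 += d*x' (only entered when i ∈ grp)
def pvArmA (grp : List Char) (d : Char) (i : Char) (s1 : List Char) : List Char :=
  match PySem.List.index? grp i with
  | some x => s1 ++ List.replicate (x + 1) d
  | none => s1

def printSequence (S : String) : String :=
  String.ofList <|
    S.toList.foldl (fun s1 i =>
      if i ∈ pv2 then pvArmA pv2 '2' i s1
      else if i ∈ pv3 then pvArmA pv3 '3' i s1
      else if i ∈ pv4 then pvArmA pv4 '4' i s1
      else if i ∈ pv5 then pvArmA pv5 '5' i s1
      else if i ∈ pv6 then pvArmA pv6 '6' i s1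
      else if i ∈ pv7 then pvArmA pv7 '7' i s1
      else if i ∈ pv8 then pvArmA pv8 '8' i s1
      else if i ∈ pv9 then pvArmA pv9 '9' i s1
      else if i = ' ' then s1 ++ ['0']
      else s1) []

-- ===== PORT B =====
-- one character's key presses, computed arithmetically from its code (Source B's loop body)
def pvEnc (c : Char) : List Char :=
  let o : Int := (c.toNat : Int) - 65
  if 0 ≤ o ∧ o < 26 then
    if o < 15 then
      -- d, r = divmod(o, 3); chr(50+d) * (r+1)
      let d := PySem.Int.floordiv o 3
      let r := PySem.Int.mod o 3
      List.replicate (r + 1).toNat (Char.ofNat (50 + d).toNat)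
    else if o < 19 then List.replicate (o - 14).toNat '7'
    else if o < 22 then List.replicate (o - 18).toNat '8'
    else List.replicate (o - 21).toNat '9'
  else if c = ' ' then ['0'] else []

def printSequence_alt (S : String) : String :=
  String.ofList ((S.toList.map pvEnc).flatten)

-- ===== PRECONDITION & SPEC =====
def Spec_printSequence (S : String) (out : String) : Prop := out = printSequence_alt S
instance (S : String) (out : String) : Decidable (Spec_printSequence S out) := by unfold Spec_printSequence; infer_instance

-- ===== CLAIM =====
def Claim_equal_printSequence : Prop := ∀ (S : String), Dom_printSequence S → Spec_printSequence S (printSequence S)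

-- ===== LEMMAS AND PROOFS =====

-- A's loop body at the empty accumulator
def pvStepA (i : Char) : List Char :=
  if i ∈ pv2 then pvArmA pv2 '2' i []
  else if i ∈ pv3 then pvArmA pv3 '3' i []
  else if i ∈ pv4 then pvArmA pv4 '4' i []
  else if i ∈ pv5 then pvArmA pv5 '5' i []
  else if i ∈ pv6 then pvArmA pv6 '6' i []
  else if i ∈ pv7 then pvArmA pv7 '7' i []
  else if i ∈ pv8 then pvArmA pv8 '8' i []
  else if i ∈ pv9 then pvArmA pv9 '9' i []
  else if i = ' ' then [] ++ ['0']
  else []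

-- per-character agreement over the whole ASCII range of Dom
theorem pvStep_eq_small : ∀ n, n < 127 → pvStepA (Char.ofNat n) = pvEnc (Char.ofNat n) := by
  decide

theorem pvChar_ofNat_toNat (c : Char) : Char.ofNat c.toNat = c :=
  Char.ofNat_toNat c

theorem pvStep_eq (i : Char) (h : pvDomChar i = true) : pvStepA i = pvEnc i := by
  have hle : i.toNat < 127 := by
    simp only [pvDomChar, Bool.or_eq_true, Bool.and_eq_true, decide_eq_true_eq, beq_iff_eq] at h
    omega
  have := pvStep_eq_small i.toNat hle
  rwa [pvChar_ofNat_toNat] at this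

-- each arm prepends its accumulator
theorem pvArmA_shift (grp : List Char) (d c : Char) (acc : List Char) :
    pvArmA grp d c acc = acc ++ pvArmA grp d c [] := by
  unfold pvArmA; cases PySem.List.index? grp c <;> simp

theorem pvStepA_shift (i : Char) (acc : List Char) :
    (if i ∈ pv2 then pvArmA pv2 '2' i acc
      else if i ∈ pv3 then pvArmA pv3 '3' i acc
      else if i ∈ pv4 then pvArmA pv4 '4' i acc
      else if i ∈ pv5 then pvArmA pv5 '5' i acc
      else if i ∈ pv6 then pvArmA pv6 '6' i acc
      else if i ∈ pv7 then pvArmA pv7 '7' i acc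
      else if i ∈ pv8 then pvArmA pv8 '8' i acc
      else if i ∈ pv9 then pvArmA pv9 '9' i acc
      else if i = ' ' then acc ++ ['0']
      else acc) = acc ++ pvStepA i := by
  unfold pvStepA
  split_ifs <;> first | rw [pvArmA_shift] | simp

-- the A-side fold is acc ++ flatten of B's per-char outputs, for Dom characters
theorem pvFoldA (l : List Char) (hl : ∀ c ∈ l, pvDomChar c = true) (acc : List Char) :
    l.foldl (fun s1 i =>
      if i ∈ pv2 then pvArmA pv2 '2' i s1
      else if i ∈ pv3 then pvArmA pv3 '3' i s1
      else if i ∈ pv4 then pvArmA pv4 '4' i s1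
      else if i ∈ pv5 then pvArmA pv5 '5' i s1
      else if i ∈ pv6 then pvArmA pv6 '6' i s1
      else if i ∈ pv7 then pvArmA pv7 '7' i s1
      else if i ∈ pv8 then pvArmA pv8 '8' i s1
      else if i ∈ pv9 then pvArmA pv9 '9' i s1
      else if i = ' ' then s1 ++ ['0']
      else s1) acc
    = acc ++ (l.map pvEnc).flatten := by
  induction l generalizing acc with
  | nil => simp
  | cons c t ih =>
    rw [List.foldl_cons, pvStepA_shift,
      pvStep_eq c (hl c (List.mem_cons_self)),
      ih (fun d hd => hl d (List.mem_cons_of_mem _ hd))]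
    simp

-- ===== VERDICT =====
theorem printSequence_spec : Claim_equal_printSequence := by
  intro S hDom
  unfold Spec_printSequence printSequence printSequence_alt
  have hl : ∀ c ∈ S.toList, pvDomChar c = true := by
    simpa [Dom_printSequence, pvDomStr, List.all_eq_true] using hDom
  rw [pvFoldA _ hl]
  simp
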